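-- pv_equiv track=rewrite | github.com/kamerok/aoc | python/2024/solutions/day24.py | get_binary_number
-- ===== SOURCE A (Python) =====
-- def get_binary_number(name, values):
--     number_values = {k for k in values.keys() if k.startswith(name)}
--     max_index = max(int(v[1:]) for v in number_values)
--     bites = [False for _ in range(max_index + 1)]
--     for value in number_values:
--         index = int(value[1:])
--         bites[index] = values[value]
--     bit_array = list(map(str, map(int, bites)))
--     binary_value = ''.join(reversed(bit_array))
--     return binary_value
-- ===== SOURCE B (Python) =====
-- def get_binary_number(name, values):
--     width = max(int(k[1:]) for k in values if k.startswith(name)) + 1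
--     acc = sum(1 << int(k[1:]) for k, v in values.items() if v and k.startswith(name))
--     return format(acc, 'b').zfill(width)
-- ===== Notes on version B (the rewrite author's own statement) =====
-- stated objective: alternative
-- what changed: B replaces A's dense boolean list built from a key set plus a map/map/reverse/join pipeline by integer arithmetic: it sums the whole number as an int (1 << index for each true wire), takes the width from max()+1, and renders the result at once with format(acc, 'b').zfill(width). Pre_ excludes inputs where no key matches, a matching key's suffix is not a nonnegative int literal, or two matching keys parse to the same index: there A raises ValueError/IndexError, wraps a negative index into the top of its dense list, or returns a value depending on Python's set-iteration (hash) order.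
-- outside the precondition, e.g. on get_binary_number('z', {'z-2': True, 'z2': False}): A returns '010', B raises ValueError; on get_binary_number('z', {'z1': True, 'z01': True}): A returns '10', B returns '100'
import Mathlib
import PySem

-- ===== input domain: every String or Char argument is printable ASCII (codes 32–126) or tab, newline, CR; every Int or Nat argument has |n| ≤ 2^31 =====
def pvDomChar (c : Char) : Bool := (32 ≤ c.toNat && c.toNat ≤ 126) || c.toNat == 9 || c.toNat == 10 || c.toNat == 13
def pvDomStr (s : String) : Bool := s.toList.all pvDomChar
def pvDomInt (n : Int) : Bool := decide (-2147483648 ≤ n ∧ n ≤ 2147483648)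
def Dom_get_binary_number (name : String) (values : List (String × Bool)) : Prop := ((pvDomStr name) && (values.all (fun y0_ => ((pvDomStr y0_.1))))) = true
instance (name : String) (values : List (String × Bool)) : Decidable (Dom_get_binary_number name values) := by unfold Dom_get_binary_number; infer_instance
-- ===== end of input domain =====

-- B drops A's dense boolean list and string pipeline: one pass accumulates the number itself as an
-- integer (acc += 1 << index) plus the width, then formats it in binary at once (objective: alternative).

-- ===== PORT A =====
-- int(k[1:]) as Option: none = ValueError
def pvIdx? (k : String) : Option Int :=
  PySem.Int.ofStr? (PySem.Str.slice k (some 1) none)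

-- int(k[1:]), totalised: outside Pre_ the parse may fail, -1 marks that (Python raises ValueError there)
def pvIdx (k : String) : Int := (pvIdx? k).getD (-1)

def get_binary_number (name : String) (values : List (String × Bool)) : String :=
  let d : PySem.Dict String Bool := PySem.Dict.mk values
  let number_values : PySem.Set String :=
    PySem.Set.ofList (d.keys.filter (fun k => PySem.Str.startswith k name))
  let max_index : Int := (PySem.List.max? (number_values.map pvIdx) id).getD 0
  let bites0 : List Bool := (PySem.List.pyRange 0 (max_index + 1) 1).map (fun _ => false)
  let bites : List Bool :=
    number_values.foldl (fun bs v => PySem.List.pySetD bs (pvIdx v) (d.getD v false)) bites0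
  let bit_array : List String := bites.map (fun b => PySem.Int.toStr (if b then 1 else 0))
  PySem.Str.join "" bit_array.reverse

-- ===== PORT B =====
-- max(...)+1 totalised with getD 0: outside Pre_ the generator may be empty (Python raises ValueError);
-- '1 << index' is 2 ^ index.toNat, exact for index >= 0 (Pre_; Python raises on a negative shift)
def get_binary_number_alt (name : String) (values : List (String × Bool)) : String :=
  let width : Int :=
    (PySem.List.max? (((values.map (fun p => p.1)).filter
      (fun k => PySem.Str.startswith k name)).map pvIdx) id).getD 0 + 1
  let acc : Int :=
    (values.filter (fun p => p.2 && PySem.Str.startswith p.1 name)).foldl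
      (fun a p => a + 2 ^ (pvIdx p.1).toNat) 0
  PySem.Str.zfill (PySem.Int.toBin acc) width

-- ===== PRECONDITION & SPEC =====
def pvMatchKeys (name : String) (values : List (String × Bool)) : List String :=
  (values.map (fun p => p.1)).filter (fun k => PySem.Str.startswith k name)

-- Pre_ excludes inputs where no key matches or some matching key's suffix is not a nonnegative int
-- literal or two matching keys parse to the same index: there A raises ValueError/IndexError, wraps
-- a negative index to the top of the dense list, or returns a value that depends on Python's
-- set-iteration (hash) order, all defensible corners B does not reproduce.  The Nodup conjunct on
-- the keys only restates that `values` is a Python dict (it excludes no Python-representable input).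
def Pre_get_binary_number (name : String) (values : List (String × Bool)) : Prop :=
  (values.map (fun p => p.1)).Nodup ∧
  pvMatchKeys name values ≠ [] ∧
  (∀ k ∈ pvMatchKeys name values, 0 ≤ pvIdx k) ∧
  ((pvMatchKeys name values).map pvIdx).Nodup

instance (name : String) (values : List (String × Bool)) : Decidable (Pre_get_binary_number name values) := by
  unfold Pre_get_binary_number; infer_instance

def pvWitness_get_binary_number : String × (List (String × Bool)) := ("z", [("z0", true), ("z2", true)])

def Spec_get_binary_number (name : String) (values : List (String × Bool)) (out : String) : Prop := out = get_binary_number_alt name values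
instance (name : String) (values : List (String × Bool)) (out : String) : Decidable (Spec_get_binary_number name values out) := by unfold Spec_get_binary_number; infer_instance

-- ===== CLAIM (what is proved, stated in full; the proofs are below) =====
def Claim_equal_get_binary_number : Prop := ∀ (name : String) (values : List (String × Bool)), Dom_get_binary_number name values → Pre_get_binary_number name values → Spec_get_binary_number name values (get_binary_number name values)

-- ===== LEMMAS AND PROOFS =====

-- the matching (key, value) pairs
def pvL (name : String) (values : List (String × Bool)) : List (String × Bool) :=
  values.filter (fun p => PySem.Str.startswith p.1 name)

-- the (index, value) images of the matching pairs
def pvL' (name : String) (values : List (String × Bool)) : List (Int × Bool) :=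
  (pvL name values).map (fun p => (pvIdx p.1, p.2))

lemma pvMatchKeys_eq (name : String) (values : List (String × Bool)) :
    pvMatchKeys name values = (pvL name values).map (fun p => p.1) := by
  simp only [pvMatchKeys, pvL, List.filter_map]
  rfl

lemma pvMax?_isSome (l : List Int) (h : l ≠ []) :
    ∃ m, PySem.List.max? l id = some m := by
  unfold PySem.List.max?
  cases l with
  | nil => simp at h
  | cons x xs =>
    simp only [List.foldl_cons]
    induction xs generalizing x with
    | nil => exact ⟨x, rfl⟩
    | cons y ys ih =>
      simp only [List.foldl_cons]
      by_cases hc : x < y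
      · rw [show (if id x < id y then some y else some x) = some y by simp [hc]]
        exact ih y (by simp)
      · rw [show (if id x < id y then some y else some x) = some x by simp [hc]]
        exact ih x (by simp)

lemma pvFold_length (L : List (Int × Bool)) (init : List Bool)
    (hb : ∀ q ∈ L, 0 ≤ q.1 ∧ q.1 < (init.length : Int)) :
    (L.foldl (fun bs q => PySem.List.pySetD bs q.1 q.2) init).length = init.length := by
  induction L generalizing init with
  | nil => rfl
  | cons q L ih =>
    have h0 := hb q (by simp)
    simp only [List.foldl_cons, PySem.List.pySetD_of_nonneg _ _ h0.1]
    rw [ih _ (by intro p hp; simpa [List.length_set] using hb p (by simp [hp]))]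
    simp [List.length_set]

-- value of a list of bits, least significant first
def pvVal : List Bool → Nat
  | [] => 0
  | b :: t => (if b then 1 else 0) + 2 * pvVal t

-- value of a list of bits, most significant first
def pvValM : List Bool → Nat
  | [] => 0
  | b :: t => (if b then 1 else 0) * 2 ^ t.length + pvValM t

lemma pvValM_append (xs ys : List Bool) :
    pvValM (xs ++ ys) = pvValM xs * 2 ^ ys.length + pvValM ys := by
  induction xs with
  | nil => simp [pvValM]
  | cons b xs ih =>
    simp only [List.cons_append, pvValM, List.length_append, ih, pow_add]
    ring

lemma pvVal_eq_pvValM_reverse (bs : List Bool) : pvVal bs = pvValM bs.reverse := by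
  induction bs with
  | nil => rfl
  | cons b t ih =>
    simp only [pvVal, List.reverse_cons, pvValM_append, pvValM, List.length_cons,
      List.length_nil, ih]
    cases b <;> norm_num <;> ring

lemma pvValM_lt (ms : List Bool) : pvValM ms < 2 ^ ms.length := by
  induction ms with
  | nil => simp [pvValM]
  | cons b t ih =>
    simp only [pvValM, List.length_cons, pow_succ]
    cases b <;> simp <;> omega

lemma pvVal_allFalse (l : List Bool) (h : ∀ b ∈ l, b = false) : pvVal l = 0 := by
  induction l with
  | nil => rfl
  | cons b t ih =>
    have hb : b = false := h b (by simp)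
    simp [pvVal, hb, ih (fun x hx => h x (by simp [hx]))]

lemma pvVal_set (bs : List Bool) (j : Nat) (v : Bool) (hj : j < bs.length)
    (h0 : bs.getD j false = false) :
    pvVal (bs.set j v) = pvVal bs + (if v then 2 ^ j else 0) := by
  induction bs generalizing j with
  | nil => simp at hj
  | cons b t ih =>
    cases j with
    | zero =>
      simp only [List.getD_cons_zero] at h0
      subst h0
      cases v <;> simp [pvVal, List.set] <;> omega
    | succ j =>
      simp only [List.set_cons_succ, pvVal]
      rw [ih j (by simpa using hj) (by simpa using h0)]
      cases v <;> simp [pow_succ] <;> ring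

lemma pvAccFold (L : List (Int × Bool)) :
    ∀ (bs : List Bool) (a : Int),
    (L.map Prod.fst).Nodup →
    (∀ q ∈ L, 0 ≤ q.1 ∧ q.1 < (bs.length : Int) ∧ bs.getD q.1.toNat false = false) →
    L.foldl (fun a q => if q.2 then a + 2 ^ q.1.toNat else a) a
      = a + (pvVal (L.foldl (fun bs q => PySem.List.pySetD bs q.1 q.2) bs) : Int)
          - (pvVal bs : Int) := by
  induction L with
  | nil => intro bs a _ _; simp
  | cons q L ih =>
    intro bs a hnd hb
    have h0 := hb q (by simp)
    have hjlt : q.1.toNat < bs.length := by omega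
    simp only [List.foldl_cons, PySem.List.pySetD_of_nonneg _ _ h0.1]
    have hval : pvVal (bs.set q.1.toNat q.2)
        = pvVal bs + (if q.2 then 2 ^ q.1.toNat else 0) :=
      pvVal_set bs q.1.toNat q.2 hjlt h0.2.2
    rw [List.map_cons, List.nodup_cons] at hnd
    obtain ⟨hfresh, hnd'⟩ := hnd
    rw [ih (bs.set q.1.toNat q.2) _ hnd' ?_]
    · cases hq2 : q.2 <;> simp only [hq2] at hval ⊢ <;> push_cast [hval] <;> push_cast <;> ring_nf <;> omega
    · intro p hp
      have hp0 := hb p (by simp [hp])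
      have hne : p.1 ≠ q.1 := by
        intro hcontra
        exact hfresh (hcontra ▸ List.mem_map_of_mem hp)
      have hneNat : p.1.toNat ≠ q.1.toNat := by omega
      refine ⟨hp0.1, by simpa using hp0.2.1, ?_⟩
      rw [List.getD_eq_getElem?_getD, List.getElem?_set_ne (by omega)]
      rw [List.getD_eq_getElem?_getD] at hp0
      exact hp0.2.2

-- binary digits of n, most significant first, with no digits at all for 0
def pvDigits (n : Nat) : List Char :=
  if h : n = 0 then [] else pvDigits (n / 2) ++ [if n % 2 = 1 then '1' else '0']
decreasing_by exact Nat.div_lt_self (Nat.pos_of_ne_zero h) one_lt_two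

-- left-pad with '0' to length L
def pvPad (L : Nat) (cs : List Char) : List Char :=
  List.replicate (L - cs.length) '0' ++ cs

lemma pvDigits_length : ∀ (k n : Nat), n < 2 ^ k → (pvDigits n).length ≤ k := by
  intro k
  induction k with
  | zero =>
    intro n hn
    have : n = 0 := by simpa using hn
    simp [this, pvDigits]
  | succ k ih =>
    intro n hn
    by_cases h : n = 0
    · simp [h, pvDigits]
    · rw [pvDigits]
      simp only [h, dif_neg, not_false_iff, List.length_append, List.length_singleton]
      have : n / 2 < 2 ^ k := by
        rw [pow_succ] at hn; omega
      have := ih (n / 2) this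
      omega

lemma pvDigits_mem : ∀ (n : Nat), ∀ c ∈ pvDigits n, c = '0' ∨ c = '1' := by
  intro n
  induction n using pvDigits.induct with
  | case1 => simp [pvDigits]
  | case2 n hn ih =>
    rw [pvDigits]
    simp only [hn, dif_neg, not_false_iff, List.mem_append, List.mem_singleton]
    intro c hc
    rcases hc with hc | hc
    · exact ih c hc
    · subst hc; split_ifs <;> simp

lemma pvDigits_pow_add : ∀ (k m : Nat), m < 2 ^ k →
    pvDigits (2 ^ k + m) = '1' :: pvPad k (pvDigits m) := by
  intro k
  induction k with
  | zero =>
    intro m hm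
    have hm0 : m = 0 := by simpa using hm
    subst hm0
    rw [pvDigits]
    norm_num
    simp [pvDigits, pvPad]
  | succ k ih =>
    intro m hm
    have hne : 2 ^ (k + 1) + m ≠ 0 := by positivity
    rw [pvDigits]
    simp only [hne, dif_neg, not_false_iff]
    have hps : (2 : Nat) ^ (k + 1) = 2 ^ k * 2 := pow_succ 2 k
    have hdiv : (2 ^ (k + 1) + m) / 2 = 2 ^ k + m / 2 := by
      rw [hps]; omega
    have hmod : (2 ^ (k + 1) + m) % 2 = m % 2 := by
      rw [hps]; omega
    have hm2 : m / 2 < 2 ^ k := by rw [hps] at hm; omega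
    rw [hdiv, hmod, ih (m / 2) hm2]
    by_cases hm0 : m = 0
    · subst hm0
      have h0 : pvDigits 0 = [] := by rw [pvDigits]; simp
      simp [h0, pvPad, List.replicate_succ']
    · have hdm : pvDigits m = pvDigits (m / 2) ++ [if m % 2 = 1 then '1' else '0'] := by
        conv_lhs => rw [pvDigits]
        simp [hm0]
      rw [List.cons_append]
      congr 1
      rw [hdm]
      unfold pvPad
      rw [List.length_append, List.length_singleton, List.append_assoc]
      congr 2
      omega

lemma pvToDigitsCore : ∀ (fuel n : Nat) (ds : List Char), n < fuel →
    Nat.toDigitsCore 2 fuel n ds = (if n = 0 then ['0'] else pvDigits n) ++ ds := by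
  intro fuel
  induction fuel with
  | zero => intro n ds h; omega
  | succ fuel ih =>
    intro n ds h
    rw [Nat.toDigitsCore]
    by_cases h2 : n / 2 = 0
    · have : n = 0 ∨ n = 1 := by omega
      rcases this with h0 | h1
      · subst h0; simp [h2, Nat.digitChar]
      · subst h1
        have hd1 : pvDigits 1 = ['1'] := by
          rw [pvDigits, dif_neg one_ne_zero]
          norm_num
          rw [pvDigits]
          simp
        simp [h2, hd1, Nat.digitChar]
    · have hn2 : n ≥ 2 := by omega
      simp only [h2, if_neg, ite_false]
      rw [ih (n / 2) _ (by omega)]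
      simp only [h2, if_neg, ite_false]
      conv_rhs => rw [if_neg (by omega : ¬ n = 0), pvDigits]
      simp only [show n ≠ 0 by omega, dif_neg, not_false_iff]
      rw [List.append_assoc, List.singleton_append]
      congr 2
      rcases Nat.mod_two_eq_zero_or_one n with hm | hm <;> rw [hm] <;> simp [Nat.digitChar]

lemma pvToDigits (n : Nat) : Nat.toDigits 2 n = if n = 0 then ['0'] else pvDigits n := by
  rw [Nat.toDigits, pvToDigitsCore (n + 1) n [] (by omega), List.append_nil]

lemma pvPad_main : ∀ (ms : List Bool),
    pvPad ms.length (pvDigits (pvValM ms)) = ms.map (fun b => if b then '1' else '0') := by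
  intro ms
  induction ms with
  | nil => simp [pvValM, pvDigits, pvPad]
  | cons b t ih =>
    cases b with
    | false =>
      have hlen : (pvDigits (pvValM t)).length ≤ t.length :=
        pvDigits_length t.length (pvValM t) (pvValM_lt t)
      simp only [pvValM, if_false, Bool.false_eq_true, zero_mul, zero_add, List.length_cons,
        List.map_cons]
      unfold pvPad
      rw [show t.length + 1 - (pvDigits (pvValM t)).length
          = (t.length - (pvDigits (pvValM t)).length) + 1 by omega]
      rw [List.replicate_succ, List.cons_append]
      unfold pvPad at ih
      rw [ih]
    | true =>
      simp only [pvValM, if_true, one_mul, List.length_cons, List.map_cons]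
      rw [pvDigits_pow_add t.length (pvValM t) (pvValM_lt t), ih]
      unfold pvPad
      simp

lemma pvJoin_toList (l : List Bool) :
    (PySem.Str.join "" (l.map (fun b => PySem.Int.toStr (if b then 1 else 0)))).toList
      = l.map (fun b => if b then '1' else '0') := by
  rw [PySem.Str.toList_join]
  have h1 : (l.map (fun b => PySem.Int.toStr (if b then 1 else 0))).map String.toList
      = (l.map (fun b => if b then '1' else '0')).map (fun c => [c]) := by
    rw [List.map_map, List.map_map]
    apply List.map_congr_left
    intro b _
    cases b <;> decide
  rw [h1]
  have : ("" : String).toList = [] := rfl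
  rw [this, PySem.Chars.join_nil_singletons]

lemma pvChars_zfill_eq (D : List Char) (w : Int) (hne : D ≠ [])
    (hmem : ∀ c ∈ D, c = '0' ∨ c = '1') :
    PySem.Chars.zfill D w = pvPad w.toNat D := by
  cases D with
  | nil => exact absurd rfl hne
  | cons c rest =>
    have hc : c = '0' ∨ c = '1' := hmem c (by simp)
    have hcs : ¬ (c = '+' ∨ c = '-') := by rcases hc with h | h <;> subst h <;> decide
    unfold PySem.Chars.zfill pvPad
    split_ifs with hle
    · rw [show w.toNat - (c :: rest).length = 0 by
        simp only [List.length_cons] at hle ⊢; omega]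
      simp
    · simp only [hcs, if_false]

lemma pvZfill_toList (n w : Int) (h0 : 0 ≤ n) (hw : 0 < w) :
    (PySem.Str.zfill (PySem.Int.toBin n) w).toList = pvPad w.toNat (pvDigits n.toNat) := by
  rw [PySem.Str.toList_zfill, PySem.Int.toList_toBin]
  have htb : PySem.Int.toBinChars n = Nat.toDigits 2 n.toNat := by
    unfold PySem.Int.toBinChars
    rw [if_neg (by omega)]
  rw [htb, pvToDigits]
  set D : List Char := if n.toNat = 0 then ['0'] else pvDigits n.toNat with hD
  have hmem : ∀ c ∈ D, c = '0' ∨ c = '1' := by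
    intro c hc
    rw [hD] at hc
    split_ifs at hc with h
    · simp at hc; subst hc; left; rfl
    · exact pvDigits_mem _ c hc
  have hne : D ≠ [] := by
    rw [hD]; split_ifs with h
    · simp
    · rw [pvDigits]; simp [h]
  rw [pvChars_zfill_eq D w hne hmem]
  rw [hD]
  split_ifs with h
  · rw [show n.toNat = 0 from h]
    unfold pvPad pvDigits
    simp only [List.length_singleton, List.length_nil, Nat.sub_zero, List.append_nil, dif_pos]
    rw [show w.toNat = (w.toNat - 1) + 1 by omega, List.replicate_succ']
    simp [List.append_assoc]
  · rfl

set_option maxHeartbeats 1600000 in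
lemma pvB_canon (name : String) (values : List (String × Bool)) (M : Int)
    (hM : PySem.List.max? ((pvL' name values).map Prod.fst) id = some M) (h0M : 0 ≤ M)
    (hndL' : ((pvL' name values).map Prod.fst).Nodup)
    (hbM : ∀ q ∈ pvL' name values, 0 ≤ q.1 ∧ q.1 ≤ M) :
    get_binary_number_alt name values =
      PySem.Str.zfill (PySem.Int.toBin (pvVal
        ((pvL' name values).foldl (fun bs q => PySem.List.pySetD bs q.1 q.2)
          ((PySem.List.pyRange 0 (M + 1) 1).map (fun _ => false))))) (M + 1) := by
  set L' := pvL' name values with hL'_def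
  set init : List Bool := (PySem.List.pyRange 0 (M + 1) 1).map (fun _ => false) with hinit_def
  have hinitlen : init.length = M.toNat + 1 := by
    rw [hinit_def, List.length_map, PySem.List.length_pyRange_one]
    omega
  have hb' : ∀ q ∈ L', 0 ≤ q.1 ∧ q.1 < (init.length : Int) := by
    intro q hq
    have := hbM q hq
    rw [hinitlen]
    constructor
    · exact this.1
    · push_cast; omega
  have hinitfalse : ∀ b ∈ init, b = false := by
    intro b hb
    rw [hinit_def] at hb
    simp at hb
    exact hb.2
  simp only [get_binary_number_alt]
  -- the width: the max over the parsed indices of the matching keys is M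
  have hks : (values.map (fun p => p.1)).filter (fun k => PySem.Str.startswith k name)
      = pvMatchKeys name values := rfl
  have hI : (pvMatchKeys name values).map pvIdx = L'.map Prod.fst := by
    rw [pvMatchKeys_eq, hL'_def]
    simp [pvL', List.map_map]
  rw [hks, hI, hM]
  -- the accumulator: the guarded fold over all matching pairs
  have hfilt : values.filter (fun p => p.2 && PySem.Str.startswith p.1 name)
      = (pvL name values).filter (fun p => p.2) := by
    rw [pvL, List.filter_filter]
  have hacc : (values.filter (fun p => p.2 && PySem.Str.startswith p.1 name)).foldl
        (fun (a : Int) p => a + 2 ^ (pvIdx p.1).toNat) 0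
      = L'.foldl (fun (a : Int) q => if q.2 then a + 2 ^ q.1.toNat else a) 0 := by
    rw [hfilt, List.foldl_filter, hL'_def, pvL', List.foldl_map]
  rw [hacc]
  rw [pvAccFold L' init 0 hndL' (by
    intro q hq
    refine ⟨(hb' q hq).1, (hb' q hq).2, ?_⟩
    have hlt : q.1.toNat < init.length := by have := hb' q hq; omega
    have hg : init.getD q.1.toNat false = init[q.1.toNat] := by
      rw [List.getD_eq_getElem?_getD, List.getElem?_eq_getElem hlt]
      rfl
    rw [hg]
    exact hinitfalse _ (List.getElem_mem hlt))]
  rw [pvVal_allFalse init hinitfalse]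
  simp

lemma pvFinal (bites : List Bool) (M : Int) (h0M : 0 ≤ M)
    (hlen : bites.length = M.toNat + 1) :
    PySem.Str.join "" ((bites.map (fun b => PySem.Int.toStr (if b then 1 else 0))).reverse)
      = PySem.Str.zfill (PySem.Int.toBin (pvVal bites)) (M + 1) := by
  rw [← String.toList_inj]
  rw [show (bites.map (fun b => PySem.Int.toStr (if b then 1 else 0))).reverse
      = bites.reverse.map (fun b => PySem.Int.toStr (if b then 1 else 0)) from by
    rw [List.map_reverse]]
  rw [pvJoin_toList]
  rw [pvZfill_toList (pvVal bites) (M + 1) (by positivity) (by omega)]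
  rw [show ((pvVal bites : Int)).toNat = pvVal bites from by omega]
  rw [show (M + 1).toNat = bites.reverse.length from by rw [List.length_reverse, hlen]; omega]
  rw [pvVal_eq_pvValM_reverse]
  exact (pvPad_main bites.reverse).symm

set_option maxHeartbeats 1600000

-- ===== VERDICT (by name: the statement is the Claim_ definition above) =====
theorem get_binary_number_spec : Claim_equal_get_binary_number := by
  intro name values _hdom hpre
  obtain ⟨hnodupKeys, hne, hnn, hndIdx⟩ := hpre
  unfold Spec_get_binary_number
  set ks := pvMatchKeys name values with hks_def
  set L := pvL name values with hL_def
  set L' := pvL' name values with hL'_def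
  have hksN : ks.Nodup := hndIdx.of_map
  have hI : ks.map pvIdx = L'.map Prod.fst := by
    simp [hks_def, pvMatchKeys_eq, hL'_def, pvL', List.map_map]
  have hdkeys : (PySem.Dict.mk values).keys.Nodup := by
    simpa [PySem.Dict.keys] using hnodupKeys
  -- the common max over the index list
  obtain ⟨M, hM⟩ := pvMax?_isSome (L'.map Prod.fst) (by
    intro h
    apply hne
    have h2 : ks.map pvIdx = [] := by rw [hI, h]
    exact List.map_eq_nil_iff.mp h2)
  have hMmax : ∀ y ∈ L'.map Prod.fst, y ≤ M := by
    intro y hy; simpa using PySem.List.max?_isMax hM y hy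
  have h0M : 0 ≤ M := by
    obtain ⟨k0, hk0⟩ := List.exists_mem_of_ne_nil ks hne
    have h1 : pvIdx k0 ∈ ks.map pvIdx := List.mem_map_of_mem hk0
    rw [hI] at h1
    exact le_trans (hnn k0 hk0) (hMmax _ h1)
  have hbM : ∀ q ∈ L', 0 ≤ q.1 ∧ q.1 ≤ M := by
    intro q hq
    refine ⟨?_, hMmax _ (List.mem_map_of_mem hq)⟩
    have h1 : q.1 ∈ ks.map pvIdx := by rw [hI]; exact List.mem_map_of_mem hq
    obtain ⟨k, hk, hkq⟩ := List.mem_map.mp h1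
    rw [← hkq]; exact hnn k hk
  have hndL' : (L'.map Prod.fst).Nodup := by rw [← hI]; exact hndIdx
  -- the value A looks up in its dict is the pair's value
  have hget : ∀ p ∈ L, (PySem.Dict.mk values).getD p.1 false = p.2 := by
    intro p hp
    have hpv : p ∈ values := by
      rw [hL_def, pvL] at hp
      exact List.mem_of_mem_filter hp
    have hsome : (PySem.Dict.mk values).get? p.1 = some p.2 :=
      PySem.Dict.get?_of_mem_items _ (by simpa using hpv) hdkeys
    simp [PySem.Dict.getD, hsome]
  -- A in canonical form: bites from a fold over L'
  set init : List Bool := (PySem.List.pyRange 0 (M + 1) 1).map (fun _ => false) with hinit_def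
  set bites : List Bool := L'.foldl (fun bs q => PySem.List.pySetD bs q.1 q.2) init with hbites_def
  have hA : get_binary_number name values =
      PySem.Str.join "" ((bites.map (fun b => PySem.Int.toStr (if b then 1 else 0))).reverse) := by
    simp only [get_binary_number]
    rw [show PySem.Set.ofList ((PySem.Dict.mk values).keys.filter
        (fun k => PySem.Str.startswith k name)) = ks from by
      rw [PySem.Dict.keys_mk]
      exact PySem.Set.ofList_eq_self_of_nodup _ hksN]
    rw [show PySem.List.max? (ks.map pvIdx) id = some M from by rw [hI]; exact hM]
    simp only [Option.getD_some]
    rw [show ks = L.map (fun p => p.1) from pvMatchKeys_eq name values]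
    rw [List.foldl_map]
    rw [PySem.List.foldl_congr_mem L _ (fun bs p => PySem.List.pySetD bs (pvIdx p.1) p.2) _
      (by intro acc p hp; rw [hget p hp])]
    rw [show L.foldl (fun bs p => PySem.List.pySetD bs (pvIdx p.1) p.2) init
        = L'.foldl (fun bs q => PySem.List.pySetD bs q.1 q.2) init from by
      rw [hL'_def]
      simp only [pvL', List.foldl_map]
      rw [← hL_def]]
  -- shared facts about init and bites
  have hinitlen : init.length = M.toNat + 1 := by
    rw [hinit_def, List.length_map, PySem.List.length_pyRange_one]
    omega
  have hb' : ∀ q ∈ L', 0 ≤ q.1 ∧ q.1 < (init.length : Int) := by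
    intro q hq
    have := hbM q hq
    rw [hinitlen]
    constructor
    · exact this.1
    · push_cast; omega
  have hbiteslen : bites.length = M.toNat + 1 := by
    rw [hbites_def, pvFold_length L' init hb', hinitlen]
  -- B in canonical form, and the two canonical forms agree
  rw [hA, hbites_def, hinit_def,
    pvB_canon name values M (by rw [← hL'_def]; exact hM) h0M
      (by rw [← hL'_def]; exact hndL') (by rw [← hL'_def]; exact hbM),
    ← hinit_def, ← hL'_def, ← hbites_def]
  exact pvFinal bites M h0M hbiteslen
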